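-- pv_equiv track=rewrite | github.com/nowstartboy/my_code_new | the_exam/weiruan3.py | maxStipend2
-- ===== SOURCE A (Python) =====
-- def maxStipend2(numOfDays,taskList,state):
--     if not taskList or not numOfDays:
--         return 0
--     if state==1: #前一天工作了
--         max1=taskList[0][0]+maxStipend2(numOfDays-1,taskList[1:],1)
--     else:
--         max1=taskList[0][1]+maxStipend2(numOfDays-1,taskList[1:],1)
--     max2 = maxStipend2(numOfDays - 1, taskList[1:], 0)
--     return max(max1,max2)
-- ===== SOURCE B (Python) =====
-- def maxStipend2(numOfDays, taskList, state):
--     # Top-down dynamic programming over (day index, previous-day state), memoized.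
--     n = len(taskList)
--     memo = {}
--
--     def best(i, prev):
--         if i == n or i == numOfDays:
--             return 0
--         if (i, prev) not in memo:
--             work, rest = taskList[i]
--             pay = work if prev == 1 else rest
--             memo[(i, prev)] = max(pay + best(i + 1, 1), best(i + 1, 0))
--         return memo[(i, prev)]
--
--     return best(0, state)
-- ===== Notes on version B (the rewrite author's own statement) =====
-- stated objective: faster
-- what changed: Replaced the exponential branching recursion with top-down dynamic programming memoized over (day index, previous-day state), computing each state once.
import Mathlib
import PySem

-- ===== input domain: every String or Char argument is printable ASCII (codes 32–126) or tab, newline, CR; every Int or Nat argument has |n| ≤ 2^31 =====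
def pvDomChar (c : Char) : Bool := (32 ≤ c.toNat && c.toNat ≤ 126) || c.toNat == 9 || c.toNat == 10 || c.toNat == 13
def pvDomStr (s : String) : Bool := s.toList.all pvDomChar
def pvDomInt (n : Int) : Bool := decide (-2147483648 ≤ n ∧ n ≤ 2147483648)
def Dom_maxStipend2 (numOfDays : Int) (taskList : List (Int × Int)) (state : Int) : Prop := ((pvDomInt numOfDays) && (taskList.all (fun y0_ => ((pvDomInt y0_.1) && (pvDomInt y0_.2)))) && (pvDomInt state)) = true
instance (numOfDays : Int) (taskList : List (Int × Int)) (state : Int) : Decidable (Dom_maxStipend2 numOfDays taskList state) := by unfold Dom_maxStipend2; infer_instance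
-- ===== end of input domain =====

-- B replaces A's exponential branching recursion by top-down DP memoized over (day index, previous state); same return value everywhere.
-- ===== PORT A =====
def maxStipend2 (numOfDays : Int) (taskList : List (Int × Int)) (state : Int) : Int :=
  match taskList with
  | [] => 0
  | t :: rest =>
    if numOfDays == 0 then 0
    else
      let max1 := (if state == 1 then t.1 else t.2) + maxStipend2 (numOfDays - 1) rest 1
      let max2 := maxStipend2 (numOfDays - 1) rest 0
      max max1 max2

-- ===== PORT B =====
-- best(i, prev) of Source B; the memo dict is threaded through explicitly; fuel = n - i makes the
-- recursion structural (the fuel-0 branch is unreachable from the initial call with fuel = n).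
def pvBestB (numOfDays : Int) (taskList : List (Int × Int)) (n : Int) :
    Nat → Nat → Int → PySem.Dict (Int × Int) Int → Int × PySem.Dict (Int × Int) Int
  | 0, _, _, memo => (0, memo)
  | fuel + 1, i, prev, memo =>
    if (i : Int) == n || (i : Int) == numOfDays then (0, memo)
    else
      match memo.get? ((i : Int), prev) with
      | some v => (v, memo)
      | none =>
        let t := (PySem.List.pyGet? taskList (i : Int)).getD ((0 : Int), (0 : Int))   -- taskList[i]; always in range here
        let pay := if prev == 1 then t.1 else t.2
        let r1 := pvBestB numOfDays taskList n fuel (i + 1) 1 memo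
        let r0 := pvBestB numOfDays taskList n fuel (i + 1) 0 r1.2
        let v := max (pay + r1.1) r0.1
        (v, r0.2.insert ((i : Int), prev) v)

def maxStipend2_alt (numOfDays : Int) (taskList : List (Int × Int)) (state : Int) : Int :=
  (pvBestB numOfDays taskList (taskList.length : Int) taskList.length 0 state PySem.Dict.empty).1

-- ===== PRECONDITION & SPEC =====
def Spec_maxStipend2 (numOfDays : Int) (taskList : List (Int × Int)) (state : Int) (out : Int) : Prop := out = maxStipend2_alt numOfDays taskList state
instance (numOfDays : Int) (taskList : List (Int × Int)) (state : Int) (out : Int) : Decidable (Spec_maxStipend2 numOfDays taskList state out) := by unfold Spec_maxStipend2; infer_instance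

-- ===== CLAIM (what is proved, stated in full; the proofs are below) =====
def Claim_equal_maxStipend2 : Prop := ∀ (numOfDays : Int) (taskList : List (Int × Int)) (state : Int), Dom_maxStipend2 numOfDays taskList state → Spec_maxStipend2 numOfDays taskList state (maxStipend2 numOfDays taskList state)

-- ===== LEMMAS AND PROOFS =====

-- A's value on the i-th suffix: what best(i, prev) must return.
def pvS (numOfDays : Int) (taskList : List (Int × Int)) (i : Nat) (prev : Int) : Int :=
  maxStipend2 (numOfDays - (i : Int)) (taskList.drop i) prev

-- memo invariant: every stored entry is the correct suffix value.
def pvGood (numOfDays : Int) (taskList : List (Int × Int)) (memo : PySem.Dict (Int × Int) Int) : Prop :=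
  ∀ (j : Nat) (p v : Int), memo.get? ((j : Int), p) = some v → v = pvS numOfDays taskList j p

lemma pvGood_empty (nd : Int) (ts : List (Int × Int)) : pvGood nd ts PySem.Dict.empty := by
  intro j p v h; simp [PySem.Dict.get?_empty] at h

lemma pvS_len (nd : Int) (ts : List (Int × Int)) (prev : Int) :
    pvS nd ts ts.length prev = 0 := by
  simp [pvS, maxStipend2]

lemma pvS_nd (nd : Int) (ts : List (Int × Int)) (i : Nat) (prev : Int) (h : (i : Int) = nd) :
    pvS nd ts i prev = 0 := by
  unfold pvS
  rw [h]; simp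
  cases ts.drop i with
  | nil => simp [maxStipend2]
  | cons t rest => simp [maxStipend2]

lemma pvS_step (nd : Int) (ts : List (Int × Int)) (i : Nat) (prev : Int)
    (hi : i < ts.length) (hnd : (i : Int) ≠ nd) :
    pvS nd ts i prev =
      max ((if prev == 1 then ts[i].1 else ts[i].2) + pvS nd ts (i + 1) 1)
          (pvS nd ts (i + 1) 0) := by
  unfold pvS
  have hdrop : ts.drop i = ts[i] :: ts.drop (i + 1) := List.drop_eq_getElem_cons hi
  rw [hdrop]
  have h0 : (nd - (i : Int) == 0) = false := by
    simp only [beq_eq_false_iff_ne]; omega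
  have harg : nd - (i : Int) - 1 = nd - ((i : Nat) + 1 : Int) := by omega
  simp only [maxStipend2, h0, Bool.false_eq_true, if_false]
  rw [harg]
  push_cast
  rfl

lemma pvBestB_correct (nd : Int) (ts : List (Int × Int)) :
    ∀ (fuel i : Nat) (prev : Int) (memo : PySem.Dict (Int × Int) Int),
      i ≤ ts.length → ts.length - i ≤ fuel → pvGood nd ts memo →
      (pvBestB nd ts (ts.length : Int) fuel i prev memo).1 = pvS nd ts i prev ∧
      pvGood nd ts (pvBestB nd ts (ts.length : Int) fuel i prev memo).2 := by
  intro fuel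
  induction fuel with
  | zero =>
    intro i prev memo hile hfuel hgood
    have : i = ts.length := by omega
    subst this
    simp only [pvBestB]
    exact ⟨(pvS_len nd ts prev).symm, hgood⟩
  | succ f ih =>
    intro i prev memo hile hfuel hgood
    by_cases hbase : ((i : Int) == (ts.length : Int) || (i : Int) == nd) = true
    · constructor
      · simp only [pvBestB, hbase, if_true]
        rcases Bool.or_eq_true_iff.mp hbase with h | h
        · have : i = ts.length := by exact_mod_cast eq_of_beq h
          subst this; exact (pvS_len nd ts prev).symm
        · exact (pvS_nd nd ts i prev (eq_of_beq h)).symm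
      · simp only [pvBestB, hbase, if_true]; exact hgood
    · have hlt : i < ts.length := by
        rcases Nat.lt_or_ge i ts.length with h | h
        · exact h
        · exfalso; apply hbase
          have : i = ts.length := by omega
          subst this; simp
      have hnd : (i : Int) ≠ nd := by
        intro h; apply hbase; simp [h]
      simp only [pvBestB, hbase, Bool.false_eq_true, if_false]
      cases hmem : memo.get? ((i : Int), prev) with
      | some v =>
        refine ⟨?_, hgood⟩
        exact hgood i prev v hmem
      | none =>
        have hget : PySem.List.pyGet? ts (i : Int) = some ts[i] := by
          rw [PySem.List.pyGet?_natCast]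
          simp [hlt]
        have h1 := ih (i + 1) 1 memo (by omega) (by omega) hgood
        have h0 := ih (i + 1) 0
          (pvBestB nd ts (ts.length : Int) f (i + 1) 1 memo).2 (by omega) (by omega) h1.2
        simp only [hget, Option.getD_some]
        constructor
        · rw [pvS_step nd ts i prev hlt hnd, h1.1, h0.1]
        · intro j p v hv
          rw [PySem.Dict.get?_insert] at hv
          by_cases hjp : ((j : Int), p) = ((i : Int), prev)
          · rw [if_pos hjp] at hv
            have hji := Prod.mk.injEq _ _ _ _ ▸ hjp
            have hj : j = i := by exact_mod_cast hji.1
            have hp : p = prev := hji.2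
            subst hj; rw [hp]
            injection hv with hv
            rw [← hv, pvS_step nd ts j prev hlt hnd, h1.1, h0.1]
          · rw [if_neg hjp] at hv
            exact h0.2 j p v hv

-- ===== VERDICT (by name: the statement is the Claim_ definition above) =====
theorem maxStipend2_spec : Claim_equal_maxStipend2 := by
  intro nd ts s _
  unfold Spec_maxStipend2 maxStipend2_alt
  have h := pvBestB_correct nd ts ts.length 0 s PySem.Dict.empty
    (Nat.zero_le _) (by omega) (pvGood_empty nd ts)
  rw [h.1]
  unfold pvS
  simp
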